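-- pv_equiv track=rewrite | github.com/oleg-n-pavlov/chess-coach | src/commentary_generator.py | format_eval
-- ===== SOURCE A (Python) =====
-- EVAL_LABELS = {
--     "ru": [
--         (300, "решающее преимущество белых"),
--         (150, "большое преимущество белых"),
--         (50, "преимущество белых"),
--         (-50, "примерное равенство"),
--         (-150, "преимущество чёрных"),
--         (-300, "большое преимущество чёрных"),
--         (None, "решающее преимущество чёрных"),
--     ],
--     "en": [
--         (300, "decisive white advantage"),
--         (150, "large white advantage"),
--         (50, "white advantage"),
--         (-50, "roughly equal"),
--         (-150, "black advantage"),
--         (-300, "large black advantage"),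
--         (None, "decisive black advantage"),
--     ],
-- }
--
-- def format_eval(cp: int | None, lang: str = "ru") -> str:
--     """Format centipawn evaluation to human-readable string."""
--     if cp is None:
--         return "неизвестно" if lang == "ru" else "unknown"
--     labels = EVAL_LABELS.get(lang, EVAL_LABELS["ru"])
--     for threshold, label in labels:
--         if threshold is None or cp > threshold:
--             return label
--     return labels[-1][1]
-- ===== SOURCE B (Python) =====
-- _LABELS_ASC = {
--     "ru": [
--         "решающее преимущество чёрных",
--         "большое преимущество чёрных",
--         "преимущество чёрных",
--         "примерное равенство",
--         "преимущество белых",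
--         "большое преимущество белых",
--         "решающее преимущество белых",
--     ],
--     "en": [
--         "decisive black advantage",
--         "large black advantage",
--         "black advantage",
--         "roughly equal",
--         "white advantage",
--         "large white advantage",
--         "decisive white advantage",
--     ],
-- }
--
-- _BOUNDS = (-300, -150, -50, 50, 150, 300)
--
--
-- def format_eval(cp, lang="ru"):
--     """Format centipawn evaluation to human-readable string."""
--     if cp is None:
--         return "неизвестно" if lang == "ru" else "unknown"
--     labels = _LABELS_ASC.get(lang, _LABELS_ASC["ru"])
--     return labels[sum(b < cp for b in _BOUNDS)]
-- ===== Notes on version B (the rewrite author's own statement) =====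
-- stated objective: idiomatic
-- what changed: Replaces the early-return threshold loop with a direct table lookup: the band index is the count of ascending boundaries strictly below cp, indexing an ascending label list.
import Mathlib
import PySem

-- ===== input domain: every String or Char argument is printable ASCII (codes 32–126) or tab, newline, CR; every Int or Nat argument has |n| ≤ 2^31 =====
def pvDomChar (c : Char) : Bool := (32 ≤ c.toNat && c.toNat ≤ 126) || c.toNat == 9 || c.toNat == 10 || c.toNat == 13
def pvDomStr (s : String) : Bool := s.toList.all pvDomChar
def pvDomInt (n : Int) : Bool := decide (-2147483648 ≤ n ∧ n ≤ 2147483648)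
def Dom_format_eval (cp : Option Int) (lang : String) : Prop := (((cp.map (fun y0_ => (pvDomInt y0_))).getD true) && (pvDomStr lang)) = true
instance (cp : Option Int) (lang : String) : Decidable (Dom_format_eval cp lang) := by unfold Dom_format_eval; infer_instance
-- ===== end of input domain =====

-- B replaces A's descending early-return threshold loop by an idiomatic table lookup: count ascending boundaries below cp, index an ascending label list.


-- ===== PORT A =====
-- EVAL_LABELS dict literal (insertion order ru, en)
def evalLabelsRu : List (Option Int × String) :=
  [(some 300, "решающее преимущество белых"),
   (some 150, "большое преимущество белых"),
   (some 50, "преимущество белых"),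
   (some (-50), "примерное равенство"),
   (some (-150), "преимущество чёрных"),
   (some (-300), "большое преимущество чёрных"),
   (none, "решающее преимущество чёрных")]

def evalLabelsEn : List (Option Int × String) :=
  [(some 300, "decisive white advantage"),
   (some 150, "large white advantage"),
   (some 50, "white advantage"),
   (some (-50), "roughly equal"),
   (some (-150), "black advantage"),
   (some (-300), "large black advantage"),
   (none, "decisive black advantage")]

def evalLabels : PySem.Dict String (List (Option Int × String)) :=
  PySem.Dict.ofList [("ru", evalLabelsRu), ("en", evalLabelsEn)]

-- the 'for threshold, label in labels: if threshold is None or cp > threshold: return label' loop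
def formatEvalLoop (c : Int) : List (Option Int × String) → Option String
  | [] => none
  | (t, l) :: rest =>
    match t with
    | none => some l
    | some th => if c > th then some l else formatEvalLoop c rest

def format_eval (cp : Option Int) (lang : String) : String :=
  match cp with
  | none => if lang == "ru" then "неизвестно" else "unknown"
  | some c =>
    let labels := evalLabels.getD lang evalLabelsRu
    match formatEvalLoop c labels with
    | some l => l
    | none => ((PySem.List.pyGet? labels (-1)).map Prod.snd).getD ""  -- labels[-1][1]; list is never empty here

-- ===== PORT B =====
def labelsAscRu : List String :=
  ["решающее преимущество чёрных", "большое преимущество чёрных",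
   "преимущество чёрных", "примерное равенство", "преимущество белых",
   "большое преимущество белых", "решающее преимущество белых"]

def labelsAscEn : List String :=
  ["decisive black advantage", "large black advantage", "black advantage",
   "roughly equal", "white advantage", "large white advantage",
   "decisive white advantage"]

def labelsAsc : PySem.Dict String (List String) :=
  PySem.Dict.ofList [("ru", labelsAscRu), ("en", labelsAscEn)]

def evalBounds : List Int := [-300, -150, -50, 50, 150, 300]

def format_eval_alt (cp : Option Int) (lang : String) : String :=
  match cp with
  | none => if lang == "ru" then "неизвестно" else "unknown"
  | some c =>
    let labels := labelsAsc.getD lang labelsAscRu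
    labels.getD (evalBounds.countP (fun b => decide (b < c))) ""

-- ===== PRECONDITION & SPEC =====
def Spec_format_eval (cp : Option Int) (lang : String) (out : String) : Prop := out = format_eval_alt cp lang
instance (cp : Option Int) (lang : String) (out : String) : Decidable (Spec_format_eval cp lang out) := by unfold Spec_format_eval; infer_instance

-- ===== CLAIM (what is proved, stated in full; the proofs are below) =====
def Claim_equal_format_eval : Prop := ∀ (cp : Option Int) (lang : String), Dom_format_eval cp lang → Spec_format_eval cp lang (format_eval cp lang)

-- ===== LEMMAS AND PROOFS =====

-- ===== VERDICT (by name: the statement is the Claim_ definition above) =====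
-- default-language lookups: a key that is neither "ru" nor "en" misses both dict entries
lemma getD_evalLabels_default (lang : String) (hr : lang ≠ "ru") (he : lang ≠ "en") :
    evalLabels.getD lang evalLabelsRu = evalLabelsRu := by
  have h1 : ("ru" == lang) = false := by simp; exact Ne.symm hr
  have h2 : ("en" == lang) = false := by simp; exact Ne.symm he
  simp [PySem.Dict.getD, PySem.Dict.get?,
        show evalLabels.items = [("ru", evalLabelsRu), ("en", evalLabelsEn)] from rfl,
        List.find?, h1, h2]

lemma getD_labelsAsc_default (lang : String) (hr : lang ≠ "ru") (he : lang ≠ "en") :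
    labelsAsc.getD lang labelsAscRu = labelsAscRu := by
  have h1 : ("ru" == lang) = false := by simp; exact Ne.symm hr
  have h2 : ("en" == lang) = false := by simp; exact Ne.symm he
  simp [PySem.Dict.getD, PySem.Dict.get?,
        show labelsAsc.items = [("ru", labelsAscRu), ("en", labelsAscEn)] from rfl,
        List.find?, h1, h2]

-- agreement on some c when labels are a matched (descending, ascending) pair
lemma band_eq_ru (c : Int) :
    (match formatEvalLoop c evalLabelsRu with
      | some l => l
      | none => ((PySem.List.pyGet? evalLabelsRu (-1)).map Prod.snd).getD "") =
    labelsAscRu.getD (evalBounds.countP (fun b => decide (b < c))) "" := by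
  by_cases h1 : 300 < c <;> by_cases h2 : 150 < c <;> by_cases h3 : 50 < c <;>
    by_cases h4 : -50 < c <;> by_cases h5 : -150 < c <;> by_cases h6 : -300 < c <;>
    first
      | omega
      | simp [formatEvalLoop, evalLabelsRu, labelsAscRu, evalBounds, List.countP,
              List.countP.go, h1, h2, h3, h4, h5, h6]

lemma band_eq_en (c : Int) :
    (match formatEvalLoop c evalLabelsEn with
      | some l => l
      | none => ((PySem.List.pyGet? evalLabelsEn (-1)).map Prod.snd).getD "") =
    labelsAscEn.getD (evalBounds.countP (fun b => decide (b < c))) "" := by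
  by_cases h1 : 300 < c <;> by_cases h2 : 150 < c <;> by_cases h3 : 50 < c <;>
    by_cases h4 : -50 < c <;> by_cases h5 : -150 < c <;> by_cases h6 : -300 < c <;>
    first
      | omega
      | simp [formatEvalLoop, evalLabelsEn, labelsAscEn, evalBounds, List.countP,
              List.countP.go, h1, h2, h3, h4, h5, h6]

-- ===== VERDICT (by name: the statement is the Claim_ definition above) =====
theorem format_eval_spec : Claim_equal_format_eval := by
  intro cp lang _
  unfold Spec_format_eval format_eval format_eval_alt
  cases cp with
  | none => rfl
  | some c =>
    by_cases hr : lang = "ru"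
    · subst hr
      rw [show evalLabels.getD "ru" evalLabelsRu = evalLabelsRu from rfl,
          show labelsAsc.getD "ru" labelsAscRu = labelsAscRu from rfl]
      exact band_eq_ru c
    · by_cases he : lang = "en"
      · subst he
        rw [show evalLabels.getD "en" evalLabelsRu = evalLabelsEn from rfl,
            show labelsAsc.getD "en" labelsAscRu = labelsAscEn from rfl]
        exact band_eq_en c
      · rw [getD_evalLabels_default lang hr he, getD_labelsAsc_default lang hr he]
        exact band_eq_ru c
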